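-- pv_equiv track=rewrite | github.com/OmriKaduri/DeepLyrics | data.py | extract_data_from_line
-- ===== SOURCE A (Python) =====
-- def extract_data_from_line(line):
--     data = []
--     artist_name_index = line.find(',')
--     name = line[:artist_name_index].lower().replace("\"", "").strip()
--     # The replace between " to empty added beacuse some names contained it, probably error at the data creation
--     line = line[artist_name_index + 1:]
--     song_name_index = line.find(',')
--     song_name = line[:song_name_index].lower().strip()
--     lyrics = line[song_name_index + 1:]
--     more_than_one = lyrics.find('&  &  &')  # Indicator for 2 songs in same line, bad dataset :(
--     curr_lyrics = lyrics[:more_than_one]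
--     data.append([name, song_name, curr_lyrics])
--     if more_than_one != -1:
--         return data + extract_data_from_line(lyrics[more_than_one + len('&  &  &'):])
--     else:
--         return data
-- ===== SOURCE B (Python) =====
-- DELIM = '&  &  &'
--
--
-- def _parse_segments(segments):
--     seg = segments[0]
--     i = seg.find(',')
--     name = seg[:i].lower().replace('"', '').strip()
--     rest = seg[i + 1:]
--     j = rest.find(',')
--     song = rest[:j].lower().strip()
--     lyrics = rest[j + 1:]
--     if len(segments) == 1:
--         return [[name, song, lyrics[:-1]]]
--     return [[name, song, lyrics]] + _parse_segments(segments[1:])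
--
--
-- def extract_data_from_line(line):
--     return _parse_segments(line.split(DELIM))
-- ===== Notes on version B (the rewrite author's own statement) =====
-- stated objective: alternative
-- what changed: B splits the whole line on the '& & &' delimiter once and then parses each segment independently in a single comprehension (last segment flagged to drop the trailing char), replacing A's recursion that re-discovers each delimiter with find inside the lyrics of the previous record.
-- outside the precondition, e.g. on extract_data_from_line('x&  &  &a,b,c'): A returns [['x&  &  &a', 'b', '']], B returns [['', '', 'x'], ['a', 'b', '']]
import Mathlib
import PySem

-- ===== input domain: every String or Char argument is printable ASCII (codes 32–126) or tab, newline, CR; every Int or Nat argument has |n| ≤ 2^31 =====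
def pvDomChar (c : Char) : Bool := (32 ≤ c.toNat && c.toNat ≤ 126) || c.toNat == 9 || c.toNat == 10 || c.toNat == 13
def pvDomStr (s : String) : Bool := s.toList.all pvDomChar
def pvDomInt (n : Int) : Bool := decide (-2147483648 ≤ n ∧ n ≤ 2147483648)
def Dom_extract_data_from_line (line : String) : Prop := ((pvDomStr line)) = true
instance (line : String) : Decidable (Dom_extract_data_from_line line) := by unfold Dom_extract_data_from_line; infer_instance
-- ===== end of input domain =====

-- B splits the line on the '&  &  &' delimiter once and parses each segment independently,
-- replacing A's recursion that re-finds each delimiter inside the previous record's lyrics (alternative decomposition, same cost).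


-- the two-songs-in-one-line delimiter '&  &  &'
def pvDelim : List Char := ['&', ' ', ' ', '&', ' ', ' ', '&']

-- ===== PORT A =====
-- A recursively parses: artist up to first comma, song up to next comma, lyrics up to the next
-- delimiter occurrence (found with find inside the lyrics), then recurses on the remainder.
def pvGoA (s : List Char) : List (List (List Char)) :=
  let i := PySem.Chars.find s [',']
  let name := PySem.Chars.strip (PySem.Chars.replace (PySem.Chars.lower (PySem.List.slice s none (some i))) ['"'] [])
  let s1 := PySem.List.slice s (some (i + 1)) none
  let j := PySem.Chars.find s1 [',']
  let song := PySem.Chars.strip (PySem.Chars.lower (PySem.List.slice s1 none (some j)))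
  let lyrics := PySem.List.slice s1 (some (j + 1)) none
  let k := PySem.Chars.find lyrics pvDelim
  let curr := PySem.List.slice lyrics none (some k)
  if h : ¬ k = -1 then
    [[name, song, curr]] ++ pvGoA (PySem.List.slice lyrics (some (k + 7)) none)
  else
    [[name, song, curr]]
termination_by s.length
decreasing_by
  have hk0 : 0 ≤ k := by
    have := PySem.Chars.neg_one_le_find lyrics pvDelim
    omega
  have hinf : pvDelim <:+: lyrics := by
    have := (PySem.Chars.find_nonneg_iff lyrics pvDelim).mp hk0
    exact this
  have h7 : 7 ≤ lyrics.length := by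
    have := hinf.length_le
    simpa [pvDelim] using this
  have hj0 : (0:Int) ≤ j + 1 := by
    have := PySem.Chars.neg_one_le_find s1 [',']
    omega
  have hi0 : (0:Int) ≤ i + 1 := by
    have := PySem.Chars.neg_one_le_find s [',']
    omega
  have e1 : lyrics = List.drop (j + 1).toNat s1 := PySem.List.slice_from s1 hj0
  have e2 : s1 = List.drop (i + 1).toNat s := PySem.List.slice_from s hi0
  have hlen1 : lyrics.length ≤ s1.length := by
    rw [e1]; simp only [List.length_drop]; omega
  have hlen2 : s1.length ≤ s.length := by
    rw [e2]; simp only [List.length_drop]; omega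
  have h0 : (0:Int) ≤ k + 7 := by omega
  have e3 : PySem.List.slice lyrics (some (k + 7)) = List.drop (k + 7).toNat lyrics :=
    PySem.List.slice_from lyrics h0
  have harg : (PySem.List.slice lyrics (some (k + 7))).length ≤ lyrics.length - 7 := by
    rw [e3]
    have : (7:Nat) ≤ (k + 7).toNat := by omega
    simp only [List.length_drop]
    omega
  have : (PySem.List.slice lyrics (some (k + 7))).length < s.length := by omega
  simpa using this

def extract_data_from_line (line : String) : List (List String) :=
  (pvGoA line.toList).map (fun r => r.map String.ofList)

-- ===== PORT B =====
-- B: split the whole line on the delimiter once, then parse each segment on its own;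
-- only the last segment drops its final character (matching A's base case).
-- The [] case is unreachable (str.split never returns an empty list; Python would raise IndexError).
def pvParseSegs (segments : List (List Char)) : List (List (List Char)) :=
  match segments with
  | [] => []
  | seg :: rest =>
    let i := PySem.Chars.find seg [',']
    let name := PySem.Chars.strip (PySem.Chars.replace (PySem.Chars.lower (PySem.List.slice seg none (some i))) ['"'] [])
    let s1 := PySem.List.slice seg (some (i + 1)) none
    let j := PySem.Chars.find s1 [',']
    let song := PySem.Chars.strip (PySem.Chars.lower (PySem.List.slice s1 none (some j)))
    let lyrics := PySem.List.slice s1 (some (j + 1)) none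
    if rest.isEmpty then
      [[name, song, PySem.List.slice lyrics none (some (-1))]]
    else
      [[name, song, lyrics]] ++ pvParseSegs rest

def extract_data_from_line_alt (line : String) : List (List String) :=
  (pvParseSegs (PySem.Chars.splitOn line.toList pvDelim)).map (fun r => r.map String.ofList)

-- ===== PRECONDITION & SPEC =====
-- Pre_ excludes lines in which a '&  &  &' delimiter occurs before the second comma of a record
-- (i.e. some non-final delimiter-separated segment has fewer than two commas): there A absorbs the
-- delimiter into the artist/song-name field while B splits on it first — on such malformed lines
-- both parses are equally defensible and neither is specified.
def Pre_extract_data_from_line (line : String) : Prop :=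
  ∀ seg ∈ (PySem.Chars.splitOn line.toList pvDelim).dropLast, 2 ≤ seg.count ','
instance (line : String) : Decidable (Pre_extract_data_from_line line) := by
  unfold Pre_extract_data_from_line; infer_instance

def pvWitness_extract_data_from_line : String := "queen, bohemian rhapsody, is this the real life "

def Spec_extract_data_from_line (line : String) (out : List (List String)) : Prop := out = extract_data_from_line_alt line
instance (line : String) (out : List (List String)) : Decidable (Spec_extract_data_from_line line out) := by unfold Spec_extract_data_from_line; infer_instance

-- ===== CLAIM (what is proved, stated in full; the proofs are below) =====
def Claim_equal_extract_data_from_line : Prop := ∀ (line : String), Dom_extract_data_from_line line → Pre_extract_data_from_line line → Spec_extract_data_from_line line (extract_data_from_line line)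

-- ===== LEMMAS AND PROOFS =====

-- proof-side recursive model of str.split(DELIM): scan char by char, cutting at each delimiter match
def pvConsume (pre l : List Char) : List (List Char) :=
  match h : l with
  | [] => [pre]
  | c :: rest =>
    if pvDelim.isPrefixOf l then pre :: pvConsume [] (l.drop 7)
    else pvConsume (pre ++ [c]) rest
termination_by l.length
decreasing_by
  · simp only [h, List.length_drop, List.length_cons]; omega
  · simp only [h, List.length_cons]; omega

-- find points at q iff the pattern sits at q and at no earlier position
theorem pvFind_eq (s sub : List Char) (q : Nat) (hpre : sub <+: s.drop q)
    (hmin : ∀ i < q, ¬ sub <+: s.drop i) : PySem.Chars.find s sub = (q : Int) := by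
  have hinf : sub <:+: s := hpre.isInfix.trans (List.drop_suffix q s).isInfix
  have h0 : 0 ≤ PySem.Chars.find s sub := (PySem.Chars.find_nonneg_iff s sub).mpr hinf
  obtain ⟨hp, hm⟩ := PySem.Chars.find_spec h0
  rcases Nat.lt_trichotomy (PySem.Chars.find s sub).toNat q with hlt | heq | hgt
  · exact absurd hp (hmin _ hlt)
  · omega
  · exact absurd hpre (hm _ hgt)

-- a singleton pattern sits at position n iff that character is there
theorem pvPrefix_singleton_drop (c : Char) (l : List Char) (n : Nat) :
    [c] <+: l.drop n ↔ l[n]? = some c := by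
  rcases h : l.drop n with _ | ⟨a, t⟩
  · have hn : l[n]? = none := by
      have e : l[n]? = (l.drop n)[0]? := by simp [List.getElem?_drop]
      rw [e, h]; rfl
    simp [hn]
  · have hs : l[n]? = some a := by
      have e : l[n]? = (l.drop n)[0]? := by simp [List.getElem?_drop]
      rw [e, h]; rfl
    rw [hs]
    simp [List.cons_prefix_cons, eq_comm]

theorem pvFindChar_eq (s : List Char) (c : Char) (q : Nat) (h1 : s[q]? = some c)
    (h2 : ∀ i < q, s[i]? ≠ some c) : PySem.Chars.find s [c] = (q : Int) := by
  apply pvFind_eq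
  · exact (pvPrefix_singleton_drop c s q).mpr h1
  · intro i hi hcon
    exact h2 i hi ((pvPrefix_singleton_drop c s i).mp hcon)

-- find on a cons that does not start the pattern
theorem pvFind_cons (c : Char) (rest : List Char) (h : ¬ pvDelim <+: (c :: rest)) :
    PySem.Chars.find (c :: rest) pvDelim =
      if PySem.Chars.find rest pvDelim = -1 then -1
      else PySem.Chars.find rest pvDelim + 1 := by
  by_cases hr : PySem.Chars.find rest pvDelim = -1
  · rw [if_pos hr]
    rw [PySem.Chars.find_eq_neg_one_iff] at hr ⊢
    intro hcon
    apply hr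
    rw [← PySem.Chars.isIn_iff_infix] at hcon ⊢
    rw [← PySem.Chars.exists_prefix_drop_iff_isIn] at hcon ⊢
    obtain ⟨j, hj⟩ := hcon
    match j with
    | 0 => exact absurd (by simpa using hj) h
    | j + 1 => exact ⟨j, by simpa [List.drop_succ_cons] using hj⟩
  · rw [if_neg hr]
    have h0 : 0 ≤ PySem.Chars.find rest pvDelim := by
      have := PySem.Chars.neg_one_le_find rest pvDelim
      omega
    obtain ⟨hp, hm⟩ := PySem.Chars.find_spec h0
    set qr := (PySem.Chars.find rest pvDelim).toNat with hqr
    have : PySem.Chars.find (c :: rest) pvDelim = ((qr + 1 : Nat) : Int) := by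
      apply pvFind_eq
      · simpa [List.drop_succ_cons] using hp
      · intro i hi
        match i with
        | 0 => simpa using h
        | i + 1 => simpa [List.drop_succ_cons] using hm i (by omega)
    rw [this]
    omega

theorem pvSplitOn_go_eq (fuel : Nat) (l cur : List Char) (acc : List (List Char))
    (hf : l.length < fuel) :
    PySem.Chars.splitOn.go pvDelim fuel l cur acc = acc.reverse ++ pvConsume cur.reverse l := by
  induction fuel generalizing l cur acc with
  | zero => omega
  | succ fuel ih =>
    rw [PySem.Chars.splitOn.go.eq_def]
    rcases l with _ | ⟨c, rest⟩
    · simp [pvConsume]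
    · simp only []
      by_cases hpf : pvDelim.isPrefixOf (c :: rest)
      · rw [if_pos hpf]
        rw [ih _ _ _ (by simp [pvDelim] at hf ⊢; omega)]
        rw [pvConsume, if_pos hpf]
        simp [pvDelim]
      · rw [if_neg hpf]
        rw [ih _ _ _ (by simp at hf ⊢; omega)]
        rw [pvConsume, if_neg hpf]
        simp

theorem pvSplitOn_eq_consume (s : List Char) :
    PySem.Chars.splitOn s pvDelim = pvConsume [] s := by
  have := pvSplitOn_go_eq (s.length + 1) s [] [] (by omega)
  simpa [PySem.Chars.splitOn] using this

theorem pvConsume_char_aux : ∀ (n : Nat) (l pre : List Char), l.length ≤ n →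
    pvConsume pre l =
      if 0 ≤ PySem.Chars.find l pvDelim then
        (pre ++ l.take (PySem.Chars.find l pvDelim).toNat) ::
          pvConsume [] (l.drop ((PySem.Chars.find l pvDelim).toNat + 7))
      else [pre ++ l] := by
  intro n
  induction n with
  | zero =>
    intro l pre hl
    have : l = [] := by
      cases l
      · rfl
      · simp at hl
    subst this
    have hf : PySem.Chars.find [] pvDelim = -1 := by
      rw [PySem.Chars.find_eq_neg_one_iff]
      intro hcon
      have := hcon.length_le
      simp [pvDelim] at this
    rw [pvConsume, hf]
    norm_num
  | succ n ih =>
    intro l pre hl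
    rcases l with _ | ⟨c, rest⟩
    · exact ih [] pre (by simp)
    · by_cases hpf : pvDelim.isPrefixOf (c :: rest)
      · have hprefix : pvDelim <+: (c :: rest) := List.isPrefixOf_iff_prefix.mp hpf
        have hf : PySem.Chars.find (c :: rest) pvDelim = ((0 : Nat) : Int) := by
          apply pvFind_eq
          · simpa using hprefix
          · intro i hi; omega
        rw [pvConsume, if_pos hpf, hf]
        norm_num
      · rw [pvConsume, if_neg hpf]
        have hrec := ih rest (pre ++ [c]) (by simp at hl; omega)
        rw [hrec]
        have hfc := pvFind_cons c rest (fun hcon => hpf (List.isPrefixOf_iff_prefix.mpr hcon))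
        by_cases hr : PySem.Chars.find rest pvDelim = -1
        · rw [if_pos hr] at hfc
          rw [hfc, if_neg (by omega), if_neg (by omega)]
          simp
        · have h0 : 0 ≤ PySem.Chars.find rest pvDelim := by
            have := PySem.Chars.neg_one_le_find rest pvDelim
            omega
          rw [if_neg hr] at hfc
          rw [hfc, if_pos h0, if_pos (by omega)]
          have e1 : (PySem.Chars.find rest pvDelim + 1).toNat
              = (PySem.Chars.find rest pvDelim).toNat + 1 := by omega
          rw [e1]
          simp [List.take_succ_cons, List.drop_succ_cons]

theorem pvSplit_char (s : List Char) :
    PySem.Chars.splitOn s pvDelim =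
      if 0 ≤ PySem.Chars.find s pvDelim then
        s.take (PySem.Chars.find s pvDelim).toNat ::
          PySem.Chars.splitOn (s.drop ((PySem.Chars.find s pvDelim).toNat + 7)) pvDelim
      else [s] := by
  rw [pvSplitOn_eq_consume, pvConsume_char_aux s.length s [] le_rfl,
    pvSplitOn_eq_consume]
  simp

theorem pvSplit_ne_nil (s : List Char) : PySem.Chars.splitOn s pvDelim ≠ [] := by
  rw [pvSplit_char]
  by_cases h : 0 ≤ PySem.Chars.find s pvDelim
  · simp [h]
  · simp [h]

-- counting: the first occurrence splits the count
theorem pvCount_split (s : List Char) (c : Char) (q : Nat) (h1 : s[q]? = some c)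
    (h2 : ∀ i < q, s[i]? ≠ some c) : s.count c = 1 + (s.drop (q + 1)).count c := by
  conv_lhs => rw [← List.take_append_drop (q + 1) s]
  rw [List.count_append]
  have h0 : (s.take q).count c = 0 := by
    rw [List.count_eq_zero]
    intro hmem
    obtain ⟨i, hi, hgi⟩ := List.getElem_of_mem hmem
    have hiq : i < q := by simp [List.length_take] at hi; omega
    apply h2 i hiq
    have hlen : i < s.length := by simp [List.length_take] at hi; omega
    have := List.getElem_take (xs := s) (j := q) (i := i) (h := hi)
    rw [List.getElem?_eq_some_iff]
    exact ⟨hlen, by rw [← this, hgi]⟩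
  rw [List.take_succ, List.count_append, h0, h1]
  simp

-- any [a:] slice is a suffix
theorem pvSliceFrom_suffix (xs : List Char) (a : Int) :
    PySem.List.slice xs (some a) none <:+ xs := by
  rw [PySem.List.slice_some_none]
  exact List.drop_suffix _ _

-- no delimiter in the whole string, none in any suffix
theorem pvNoDelim_in_suffix (s t : List Char) (h : t <:+ s)
    (hfind : PySem.Chars.find s pvDelim = -1) : PySem.Chars.find t pvDelim = -1 := by
  rw [PySem.Chars.find_eq_neg_one_iff] at hfind ⊢
  exact fun hcon => hfind (hcon.trans h.isInfix)

-- base case: no delimiter anywhere, one record, lyrics lose their last character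
theorem pvMain_base (s : List Char) (hfind : PySem.Chars.find s pvDelim = -1) :
    pvGoA s = pvParseSegs [s] := by
  rw [pvGoA]
  simp only [pvParseSegs]
  set s1 := PySem.List.slice s (some (PySem.Chars.find s [','] + 1)) none with hs1
  set lyr := PySem.List.slice s1 (some (PySem.Chars.find s1 [','] + 1)) none with hlyr
  have hk : PySem.Chars.find lyr pvDelim = -1 := by
    apply pvNoDelim_in_suffix s lyr _ hfind
    rw [hlyr, hs1]
    exact (pvSliceFrom_suffix _ _).trans (pvSliceFrom_suffix _ _)
  rw [hk]
  simp

-- step case, by induction on a length bound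
theorem pvMainAux : ∀ (n : Nat) (s : List Char), s.length < n →
    (∀ seg ∈ (PySem.Chars.splitOn s pvDelim).dropLast, 2 ≤ seg.count ',') →
    pvGoA s = pvParseSegs (PySem.Chars.splitOn s pvDelim) := by
  intro n
  induction n with
  | zero => intro s h; omega
  | succ n ih =>
    intro s hlen hpre
    by_cases hp0 : 0 ≤ PySem.Chars.find s pvDelim
    case neg =>
      have hfind : PySem.Chars.find s pvDelim = -1 := by
        have := PySem.Chars.neg_one_le_find s pvDelim
        omega
      rw [pvSplit_char, if_neg hp0]
      exact pvMain_base s hfind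
    case pos =>
    obtain ⟨pN, hpN⟩ : ∃ pN : Nat, PySem.Chars.find s pvDelim = (pN : Int) :=
      ⟨_, (Int.toNat_of_nonneg hp0).symm⟩
    have hocc : pvDelim <+: s.drop pN := by
      have h := (PySem.Chars.find_spec hp0).1
      rw [hpN] at h
      simpa using h
    have hminp : ∀ i < pN, ¬ pvDelim <+: s.drop i := by
      have h := (PySem.Chars.find_spec hp0).2
      rw [hpN] at h
      simpa using h
    have hplen : pN + 7 ≤ s.length := by
      have h1 := hocc.length_le
      simp [pvDelim, List.length_drop] at h1
      omega
    rw [pvSplit_char] at hpre ⊢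
    rw [hpN] at hpre ⊢
    rw [if_pos (Int.natCast_nonneg pN)] at hpre ⊢
    simp only [Int.toNat_natCast] at hpre ⊢
    rw [List.dropLast_cons_of_ne_nil (pvSplit_ne_nil _)] at hpre
    have hcnt : 2 ≤ (s.take pN).count ',' := hpre _ List.mem_cons_self
    have hpre' : ∀ seg ∈ (PySem.Chars.splitOn (s.drop (pN + 7)) pvDelim).dropLast,
        2 ≤ seg.count ',' := fun seg hs => hpre seg (List.mem_cons_of_mem _ hs)
    -- first comma: inside the segment, hence shared by s and the segment
    have hi0 : 0 ≤ PySem.Chars.find (s.take pN) [','] := by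
      rw [PySem.Chars.find_nonneg_iff, List.singleton_infix_iff]
      exact List.count_pos_iff.mp (by omega)
    obtain ⟨iN, hiNe⟩ : ∃ iN : Nat, PySem.Chars.find (s.take pN) [','] = (iN : Int) :=
      ⟨_, (Int.toNat_of_nonneg hi0).symm⟩
    have hip : [','] <+: (s.take pN).drop iN := by
      have h := (PySem.Chars.find_spec hi0).1
      rw [hiNe] at h
      simpa using h
    have him' : ∀ i < iN, (s.take pN)[i]? ≠ some ',' := by
      intro i hi hc
      have h := (PySem.Chars.find_spec hi0).2
      rw [hiNe] at h
      simp only [Int.toNat_natCast] at h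
      exact h i hi ((pvPrefix_singleton_drop _ _ _).mpr hc)
    have hcomma : (s.take pN)[iN]? = some ',' := (pvPrefix_singleton_drop _ _ _).mp hip
    have hiLt : iN < pN := by
      have := (List.getElem?_eq_some_iff.mp hcomma).1
      simp [List.length_take] at this
      omega
    have hcommaS : s[iN]? = some ',' := by
      rw [List.getElem?_take, if_pos hiLt] at hcomma
      exact hcomma
    have hminS : ∀ i < iN, s[i]? ≠ some ',' := by
      intro i hi hc
      apply him' i hi
      rw [List.getElem?_take, if_pos (by omega : i < pN)]
      exact hc
    have hfindiS : PySem.Chars.find s [','] = (iN : Int) := pvFindChar_eq s ',' iN hcommaS hminS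
    -- second comma, still inside the segment
    have hcount2 : 1 ≤ ((s.take pN).drop (iN + 1)).count ',' := by
      have := pvCount_split (s.take pN) ',' iN hcomma him'
      omega
    have hj0 : 0 ≤ PySem.Chars.find ((s.take pN).drop (iN + 1)) [','] := by
      rw [PySem.Chars.find_nonneg_iff, List.singleton_infix_iff]
      exact List.count_pos_iff.mp (by omega)
    obtain ⟨jN, hjNe⟩ : ∃ jN : Nat, PySem.Chars.find ((s.take pN).drop (iN + 1)) [','] = (jN : Int) :=
      ⟨_, (Int.toNat_of_nonneg hj0).symm⟩
    have hjp : [','] <+: ((s.take pN).drop (iN + 1)).drop jN := by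
      have h := (PySem.Chars.find_spec hj0).1
      rw [hjNe] at h
      simpa using h
    have hjm' : ∀ i < jN, ((s.take pN).drop (iN + 1))[i]? ≠ some ',' := by
      intro i hi hc
      have h := (PySem.Chars.find_spec hj0).2
      rw [hjNe] at h
      simp only [Int.toNat_natCast] at h
      exact h i hi ((pvPrefix_singleton_drop _ _ _).mpr hc)
    have hcomma2 : ((s.take pN).drop (iN + 1))[jN]? = some ',' := (pvPrefix_singleton_drop _ _ _).mp hjp
    have hjLt : jN < pN - (iN + 1) := by
      have := (List.getElem?_eq_some_iff.mp hcomma2).1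
      simp [List.length_take, List.length_drop] at this
      omega
    have hcomma2S : (s.drop (iN + 1))[jN]? = some ',' := by
      rw [List.drop_take, List.getElem?_take, if_pos hjLt] at hcomma2
      exact hcomma2
    have hmin2S : ∀ i < jN, (s.drop (iN + 1))[i]? ≠ some ',' := by
      intro i hi hc
      apply hjm' i hi
      rw [List.drop_take, List.getElem?_take, if_pos (by omega : i < pN - (iN + 1))]
      exact hc
    have hfindjS : PySem.Chars.find (s.drop (iN + 1)) [','] = (jN : Int) :=
      pvFindChar_eq _ ',' jN hcomma2S hmin2S
    -- the delimiter sits exactly at the end of this segment's lyrics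
    have hkS : PySem.Chars.find ((s.drop (iN + 1)).drop (jN + 1)) pvDelim
        = ((pN - (iN + 1) - (jN + 1) : Nat) : Int) := by
      apply pvFind_eq
      · rw [List.drop_drop, List.drop_drop]
        have e : iN + 1 + (jN + 1 + (pN - (iN + 1) - (jN + 1))) = pN := by omega
        rw [e]
        exact hocc
      · intro i hi
        rw [List.drop_drop, List.drop_drop]
        exact hminp _ (by omega)
    -- unfold both programs and rewrite every component into canonical take/drop form
    rw [pvGoA]
    simp only [pvParseSegs]
    rw [hfindiS, hiNe]
    have ec1 : (iN : Int) + 1 = ((iN + 1 : Nat) : Int) := by push_cast; ring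
    rw [ec1]
    simp only [PySem.List.slice_from_natCast, PySem.List.slice_to_natCast]
    rw [hfindjS, hjNe]
    have ec2 : (jN : Int) + 1 = ((jN + 1 : Nat) : Int) := by push_cast; ring
    rw [ec2]
    simp only [PySem.List.slice_from_natCast, PySem.List.slice_to_natCast]
    rw [hkS]
    have ec3 : ((pN - (iN + 1) - (jN + 1) : Nat) : Int) + 7
        = ((pN - (iN + 1) - (jN + 1) + 7 : Nat) : Int) := by push_cast; ring
    rw [ec3]
    rw [dif_pos (show ¬((pN - (iN + 1) - (jN + 1) : Nat) : Int) = -1 by omega)]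
    simp only [PySem.List.slice_from_natCast, PySem.List.slice_to_natCast]
    rw [if_neg (show ¬((PySem.Chars.splitOn (s.drop (pN + 7)) pvDelim).isEmpty = true) from by
      rw [List.isEmpty_iff]; exact pvSplit_ne_nil _)]
    simp only [List.drop_take, List.take_take]
    rw [show min iN pN = iN from by omega, show min jN (pN - (iN + 1)) = jN from by omega]
    simp only [List.drop_drop]
    rw [show iN + 1 + (jN + 1) + (pN - (iN + 1) - (jN + 1) + 7) = pN + 7 from by omega]
    rw [ih (s.drop (pN + 7)) (by simp [List.length_drop]; omega) hpre']

-- the heart: A's recursion equals B's per-segment parse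
theorem pvMain (s : List Char)
    (hpre : ∀ seg ∈ (PySem.Chars.splitOn s pvDelim).dropLast, 2 ≤ seg.count ',') :
    pvGoA s = pvParseSegs (PySem.Chars.splitOn s pvDelim) :=
  pvMainAux (s.length + 1) s (by omega) hpre

-- ===== VERDICT (by name: the statement is the Claim_ definition above) =====
theorem extract_data_from_line_spec : Claim_equal_extract_data_from_line := by
  intro line _ hpre
  unfold Spec_extract_data_from_line extract_data_from_line extract_data_from_line_alt
  rw [pvMain line.toList hpre]
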